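-- pv_equiv track=rewrite | github.com/Minuring/BOJ_Study | 백준/Gold/13549. 숨바꼭질 3/숨바꼭질 3.py | bfs
-- ===== SOURCE A (Python) =====
-- def bfs(N, K):
--     from collections import deque
--     visited = [False for _ in range(100001)]
--     q = deque()
--     q.append([0, N])
--
--     while q:
--         cost, x = q.popleft()
--         if visited[x]:
--             continue
--         visited[x] = True
--
--         if x == K:
--             return cost
--
--         if x*2 <= 100000:
--             q.appendleft([cost, x*2])
--         if x+1 <= 100000:
--             q.append([cost+1, x+1])
--         if x-1 >= 0:
--             q.append([cost+1, x-1])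
-- ===== SOURCE B (Python) =====
-- def bfs(N, K):
--     visited = [False] * 100001
--     frontier = [N]
--     cost = 0
--     while frontier:
--         nxt = []
--         for x in frontier:
--             # eagerly follow the zero-cost doubling chain x, 2x, 4x, ...
--             while not visited[x]:
--                 visited[x] = True
--                 if x == K:
--                     return cost
--                 if x + 1 <= 100000:
--                     nxt.append(x + 1)
--                 if x - 1 >= 0:
--                     nxt.append(x - 1)
--                 if x * 2 > 100000:
--                     break
--                 x = x * 2
--         frontier = nxt
--         cost += 1
-- ===== Notes on version B (the rewrite author's own statement) =====
-- stated objective: alternative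
-- what changed: Replaces the cost-tagged 0-1-BFS deque (appendleft for free doublings, append for +1/-1 moves) by a level-by-level search: an outer loop per distance with a plain cost counter, and an inner loop that eagerly expands the zero-cost doubling chain x, 2x, 4x, ... of each frontier node, so no deque and no per-entry cost pairs exist.
-- outside the precondition, e.g. on bfs(0, 100001): A returns None, B returns None; on bfs(100001, 3): A raises IndexError, B raises IndexError
import Mathlib
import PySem

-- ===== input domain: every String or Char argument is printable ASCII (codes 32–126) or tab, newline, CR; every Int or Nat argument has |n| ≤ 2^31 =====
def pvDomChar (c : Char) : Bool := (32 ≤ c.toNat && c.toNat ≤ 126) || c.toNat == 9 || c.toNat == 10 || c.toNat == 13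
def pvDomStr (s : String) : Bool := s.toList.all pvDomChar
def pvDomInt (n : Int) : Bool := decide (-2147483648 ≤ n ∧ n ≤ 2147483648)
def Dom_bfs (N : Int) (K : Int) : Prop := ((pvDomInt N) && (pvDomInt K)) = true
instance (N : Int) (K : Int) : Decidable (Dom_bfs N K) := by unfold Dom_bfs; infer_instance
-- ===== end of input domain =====

-- B replaces A's cost-tagged 0-1-BFS deque by a level-by-level search (outer loop per distance
-- with a plain cost counter, inner loop eagerly expanding the zero-cost doubling chain of each
-- frontier node): alternative decomposition, same results.

-- visited[x] read/write (x is always in 0..100000 on admitted runs; out-of-range is outside Pre_)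
def pvVGet (v : Array Bool) (i : Int) : Bool := v.getD i.toNat false
def pvVSet (v : Array Bool) (i : Int) : Array Bool := v.set! i.toNat true

-- ===== PORT A =====
-- Python's deque is ported exactly as the standard front/back-reversed pair of lists:
-- popleft takes the head of `front` (refilling from `backR.reverse` when `front` is empty),
-- appendleft conses onto `front`, append conses onto `backR`.  Fuel only makes the loop total.
def bfsLoop (K : Int) (fuel : Nat) (visited : Array Bool) (front backR : List (Int × Int)) : Int :=
  match fuel with
  | 0 => 0
  | fuel + 1 =>
    match (if front.isEmpty then (backR.reverse, ([] : List (Int × Int))) else (front, backR)) with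
    | ([], _) => 0   -- `while q:` fails: Python returns None (outside Pre_bfs)
    | ((cost, x) :: fr, bR) =>
      if pvVGet visited x then bfsLoop K fuel visited fr bR
      else
        let visited := pvVSet visited x
        if x = K then cost
        else
          let fr := if x * 2 ≤ 100000 then (cost, x * 2) :: fr else fr
          let bR := if x + 1 ≤ 100000 then (cost + 1, x + 1) :: bR else bR
          let bR := if x - 1 ≥ 0 then (cost + 1, x - 1) :: bR else bR
          bfsLoop K fuel visited fr bR

def bfs (N : Int) (K : Int) : Int :=
  bfsLoop K 1000000 (Array.replicate 100001 false) [(0, N)] []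

-- ===== PORT B =====
-- Source B's inner `while not visited[x]` chain: one fuel unit per evaluation of the while
-- condition (fuel only makes the loop total); `nxt` is appended at the end, ported as the
-- reversed accumulator `nxtR`.  Returns none on fuel exhaustion, otherwise
-- (found K?, remaining fuel, visited, nxtR).
def bfsChain (K : Int) (fuel : Nat) (v : Array Bool) (x : Int) (nxtR : List Int) :
    Option (Bool × Nat × Array Bool × List Int) :=
  match fuel with
  | 0 => none
  | fuel + 1 =>
    if pvVGet v x then some (false, fuel, v, nxtR)
    else
      let v := pvVSet v x
      if x = K then some (true, fuel, v, nxtR)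
      else
        let nxtR := if x + 1 ≤ 100000 then (x + 1) :: nxtR else nxtR
        let nxtR := if x - 1 ≥ 0 then (x - 1) :: nxtR else nxtR
        if x * 2 > 100000 then some (false, fuel, v, nxtR)
        else bfsChain K fuel v (x * 2) nxtR

-- termination helper for bfsLevels: a successful chain strictly consumes fuel
lemma bfsChain_fuel_lt (K : Int) : ∀ (fuel : Nat) (v : Array Bool) (x : Int) (nxtR : List Int)
    {b : Bool} {f' : Nat} {v' : Array Bool} {n' : List Int},
    bfsChain K fuel v x nxtR = some (b, f', v', n') → f' < fuel := by
  intro fuel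
  induction fuel with
  | zero => intro v x nxtR b f' v' n' h; simp [bfsChain] at h
  | succ fuel IH =>
    intro v x nxtR b f' v' n' h
    simp only [bfsChain] at h
    split_ifs at h with h1 h2 h3
    all_goals first
      | (cases h; omega)
      | exact Nat.lt_trans (IH _ _ _ h) (Nat.lt_succ_self fuel)

-- Source B's outer loops: `for x in frontier` over the current level, and `while frontier`
-- switching to the next level (`frontier = nxt; cost += 1`) when the level is exhausted.
def bfsLevels (K : Int) (fuel : Nat) (v : Array Bool) (frontier : List Int) (nxtR : List Int)
    (cost : Int) : Int :=
  match frontier with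
  | x :: fr =>
    match h : bfsChain K fuel v x nxtR with
    | none => 0   -- fuel exhausted (never on admitted runs)
    | some (true, _, _, _) => cost
    | some (false, f', v', nxtR') => bfsLevels K f' v' fr nxtR' cost
  | [] =>
    match h2 : nxtR.reverse with
    | [] => 0   -- `while frontier:` fails: Python returns None (outside Pre_bfs)
    | y :: t => bfsLevels K fuel v (y :: t) [] (cost + 1)
termination_by (fuel, frontier.length + 2 * nxtR.length)
decreasing_by
  · exact Prod.Lex.left _ _ (bfsChain_fuel_lt K fuel v x nxtR h)
  · apply Prod.Lex.right
    have hl := congrArg List.length h2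
    simp at hl ⊢
    omega

def bfs_alt (N : Int) (K : Int) : Int :=
  bfsLevels K 1000000 (Array.replicate 100001 false) [N] [] 0

-- ===== PRECONDITION & SPEC =====
-- Pre_ excludes N outside 0..100000, where both programs eventually raise IndexError, and K
-- outside 0..100000, where both fall off the loop and return None instead of an int.
def Pre_bfs (N : Int) (K : Int) : Prop := 0 ≤ N ∧ N ≤ 100000 ∧ 0 ≤ K ∧ K ≤ 100000
instance (N : Int) (K : Int) : Decidable (Pre_bfs N K) := by unfold Pre_bfs; infer_instance
def pvWitness_bfs : Int × Int := (7, 3)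

def Spec_bfs (N : Int) (K : Int) (out : Int) : Prop := out = bfs_alt N K
instance (N : Int) (K : Int) (out : Int) : Decidable (Spec_bfs N K out) := by unfold Spec_bfs; infer_instance

-- ===== CLAIM (what is proved, stated in full; the proofs are below) =====
def Claim_equal_bfs : Prop := ∀ (N : Int) (K : Int), Dom_bfs N K → Pre_bfs N K → Spec_bfs N K (bfs N K)

-- ===== LEMMAS AND PROOFS =====

-- proof-only reference: A's loop over the deque flattened to one plain list
def bfsSpecLoop (K : Int) (fuel : Nat) (visited : Array Bool) (q : List (Int × Int)) : Int :=
  match fuel with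
  | 0 => 0
  | fuel + 1 =>
    match q with
    | [] => 0
    | (cost, x) :: rest =>
      if pvVGet visited x then bfsSpecLoop K fuel visited rest
      else
        let visited := pvVSet visited x
        if x = K then cost
        else
          let rest := if x * 2 ≤ 100000 then (cost, x * 2) :: rest else rest
          let rest := if x + 1 ≤ 100000 then rest ++ [(cost + 1, x + 1)] else rest
          let rest := if x - 1 ≥ 0 then rest ++ [(cost + 1, x - 1)] else rest
          bfsSpecLoop K fuel visited rest

-- A's loop with a non-empty front does what the flattened loop does (given the IH at `fuel`)
lemma bfsLoop_step (K : Int) (fuel : Nat)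
    (IH : ∀ v f bR, bfsLoop K fuel v f bR = bfsSpecLoop K fuel v (f ++ bR.reverse)) :
    ∀ (v : Array Bool) (cost x : Int) (fr bR : List (Int × Int)),
      bfsLoop K (fuel + 1) v ((cost, x) :: fr) bR
        = bfsSpecLoop K (fuel + 1) v (((cost, x) :: fr) ++ bR.reverse) := by
  intro v cost x fr bR
  simp only [bfsLoop, bfsSpecLoop, List.isEmpty_cons, if_neg, Bool.false_eq_true,
    not_false_iff, List.cons_append]
  by_cases hv : pvVGet v x
  · simp [hv, IH]
  · simp only [hv, if_false, Bool.false_eq_true]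
    by_cases hk : x = K
    · simp [hk]
    · simp only [hk, if_false]
      split_ifs <;> simp [IH, List.append_assoc]

lemma bfsLoop_refill (K : Int) (fuel : Nat) (v : Array Bool) (bR : List (Int × Int)) :
    bfsLoop K (fuel + 1) v [] bR = bfsLoop K (fuel + 1) v bR.reverse [] := by
  cases h : bR.reverse with
  | nil => simp [bfsLoop, h]
  | cons a t => simp [bfsLoop, h]

lemma bfsLoop_eq_spec (K : Int) (fuel : Nat) :
    ∀ (v : Array Bool) (f bR : List (Int × Int)),
      bfsLoop K fuel v f bR = bfsSpecLoop K fuel v (f ++ bR.reverse) := by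
  induction fuel with
  | zero => intro v f bR; simp [bfsLoop, bfsSpecLoop]
  | succ fuel IH =>
    intro v f bR
    cases f with
    | cons a fr => obtain ⟨cost, x⟩ := a; exact bfsLoop_step K fuel IH v cost x fr bR
    | nil =>
      rw [bfsLoop_refill]
      cases h : bR.reverse with
      | nil => simp [bfsLoop, bfsSpecLoop]
      | cons a t =>
        obtain ⟨cost, x⟩ := a
        have := bfsLoop_step K fuel IH v cost x t []
        simp only [List.reverse_nil, List.append_nil] at this
        simp [this]

lemma bfsSpecLoop_nil (K : Int) (fuel : Nat) (v : Array Bool) :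
    bfsSpecLoop K fuel v [] = 0 := by
  cases fuel <;> simp [bfsSpecLoop]

-- B's doubling chain does what the flattened loop does starting at its node, fuel-exactly:
-- one chain-condition evaluation per flattened pop
lemma bfsChain_spec (K : Int) : ∀ (fuel : Nat) (v : Array Bool) (x : Int) (nxtR fr : List Int)
    (c : Int),
    bfsSpecLoop K fuel v
        ((c, x) :: (fr.map (fun y => (c, y)) ++ nxtR.reverse.map (fun y => (c + 1, y))))
      = match bfsChain K fuel v x nxtR with
        | none => 0
        | some (true, _, _, _) => c
        | some (false, f', v', nxtR') =>
            bfsSpecLoop K f' v' (fr.map (fun y => (c, y)) ++ nxtR'.reverse.map (fun y => (c + 1, y))) := by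
  intro fuel
  induction fuel with
  | zero => intro v x nxtR fr c; simp [bfsSpecLoop, bfsChain]
  | succ fuel IH =>
    intro v x nxtR fr c
    by_cases hv : pvVGet v x
    · simp [bfsSpecLoop, bfsChain, hv]
    · by_cases hk : x = K
      · subst hk
        simp [bfsSpecLoop, bfsChain, hv]
      · by_cases hd : x * 2 ≤ 100000
        · have hd' : ¬ x * 2 > 100000 := by omega
          by_cases hp : x + 1 ≤ 100000 <;> by_cases hm : x - 1 ≥ 0
          · have key := IH (pvVSet v x) (x * 2) ((x - 1) :: (x + 1) :: nxtR) fr c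
            simp only [List.reverse_cons, List.map_append, List.map_cons, List.map_nil,
              List.append_assoc, List.cons_append, List.nil_append] at key
            simp only [bfsSpecLoop, bfsChain, hv, hk, hd, hd', hp, hm, Bool.false_eq_true,
              if_true, if_false, ge_iff_le, not_false_iff, ite_true, ite_false, if_neg, if_pos]
            simpa [List.append_assoc] using key
          · have key := IH (pvVSet v x) (x * 2) ((x + 1) :: nxtR) fr c
            simp only [List.reverse_cons, List.map_append, List.map_cons, List.map_nil,
              List.append_assoc, List.cons_append, List.nil_append] at key
            simp only [bfsSpecLoop, bfsChain, hv, hk, hd, hd', hp, hm, Bool.false_eq_true,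
              if_true, if_false, ge_iff_le, not_false_iff, ite_true, ite_false, if_neg, if_pos]
            simpa [List.append_assoc] using key
          · have key := IH (pvVSet v x) (x * 2) ((x - 1) :: nxtR) fr c
            simp only [List.reverse_cons, List.map_append, List.map_cons, List.map_nil,
              List.append_assoc, List.cons_append, List.nil_append] at key
            simp only [bfsSpecLoop, bfsChain, hv, hk, hd, hd', hp, hm, Bool.false_eq_true,
              if_true, if_false, ge_iff_le, not_false_iff, ite_true, ite_false, if_neg, if_pos]
            simpa [List.append_assoc] using key
          · have key := IH (pvVSet v x) (x * 2) nxtR fr c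
            simp only [bfsSpecLoop, bfsChain, hv, hk, hd, hd', hp, hm, Bool.false_eq_true,
              if_true, if_false, ge_iff_le, not_false_iff, ite_true, ite_false, if_neg, if_pos]
            simpa [List.append_assoc] using key
        · have hd' : x * 2 > 100000 := by omega
          by_cases hp : x + 1 ≤ 100000 <;> by_cases hm : x - 1 ≥ 0
          · have hm2 : (1 : Int) ≤ x := by omega
            simp [bfsSpecLoop, bfsChain, hv, hk, hd, hd', hp, hm, hm2, List.append_assoc]
          · have hm2 : ¬ (1 : Int) ≤ x := by omega
            simp [bfsSpecLoop, bfsChain, hv, hk, hd, hd', hp, hm, hm2, List.append_assoc]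
          · have hm2 : (1 : Int) ≤ x := by omega
            simp [bfsSpecLoop, bfsChain, hv, hk, hd, hd', hp, hm, hm2, List.append_assoc]
          · have hm2 : ¬ (1 : Int) ≤ x := by omega
            simp [bfsSpecLoop, bfsChain, hv, hk, hd, hd', hp, hm, hm2, List.append_assoc]

-- B's level loop does what the flattened loop does on the current level + pending level
lemma bfsLevels_spec (K : Int) (fuel : Nat) (v : Array Bool) (frontier nxtR : List Int)
    (c : Int) :
    bfsSpecLoop K fuel v
        (frontier.map (fun y => (c, y)) ++ nxtR.reverse.map (fun y => (c + 1, y)))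
      = bfsLevels K fuel v frontier nxtR c := by
  fun_induction bfsLevels K fuel v frontier nxtR c with
  | case1 fuel v nxtR c x fr h =>
    have := bfsChain_spec K fuel v x nxtR fr c
    rw [h] at this
    simpa using this
  | case2 fuel v nxtR c x fr f1 f2 f3 h =>
    have := bfsChain_spec K fuel v x nxtR fr c
    rw [h] at this
    simpa using this
  | case3 fuel v nxtR c x fr f' v' n' h IH =>
    have := bfsChain_spec K fuel v x nxtR fr c
    rw [h] at this
    simpa [← IH] using this
  | case4 fuel v nxtR c h =>
    have : nxtR = [] := by simpa using congrArg List.reverse h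
    simp [this, bfsSpecLoop_nil]
  | case5 fuel v nxtR c y t h IH =>
    rw [show (List.map (fun y => (c, y)) ([] : List Int)) = [] from rfl, List.nil_append, h]
    simpa using IH

-- ===== VERDICT (by name: the statement is the Claim_ definition above) =====
theorem bfs_spec : Claim_equal_bfs := by
  intro N K _ _
  unfold Spec_bfs bfs bfs_alt
  rw [bfsLoop_eq_spec, ← bfsLevels_spec K 1000000 (Array.replicate 100001 false) [N] [] 0]
  simp
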